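-- pv_equiv track=rewrite | github.com/breecummins/extremadetector | ExtremaPO.py | BuildPO
-- ===== SOURCE A (Python) =====
-- def BuildPO(eventCompList,maxEps,step,n):
-- 	PO = []
-- 	for ts in range(0,len(eventCompList)):
-- 		for event in range(0,2*n):
-- 			PO.append([])
-- 			for ndx in range(0,len(eventCompList)):
-- 				for ndx1 in range(0,2*n):
-- 					fixed = eventCompList[ts][event]
-- 					checker = eventCompList[ndx][ndx1]
-- 					intSize = len(set(fixed).intersection(checker))
-- 					if intSize == 0:
-- 						if fixed[0] < checker[0]:
-- 							PO[2*n*ts + event].append(2*n*ndx + ndx1)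
-- 	return PO
-- ===== SOURCE B (Python) =====
-- def BuildPO(eventCompList, maxEps, step, n):
--     # Inverted index: map each value to the set of (flattened) event indices containing it,
--     # so the disjointness of two events becomes a membership test in a precomputed conflict set
--     # instead of a pairwise set-intersection.
--     flat = [row[e] for row in eventCompList for e in range(2 * n)]
--     m = len(flat)
--     occ = {}
--     for j, ev in enumerate(flat):
--         for v in ev:
--             occ.setdefault(v, set()).add(j)
--     heads = [ev[0] for ev in flat]
--     PO = []
--     for i, fixed in enumerate(flat):
--         conflict = set()
--         for v in fixed:
--             conflict |= occ[v]
--         PO.append([j for j in range(m) if j not in conflict and heads[i] < heads[j]])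
--     return PO
-- ===== Notes on version B (the rewrite author's own statement) =====
-- stated objective: alternative
-- what changed: B replaces A's all-pairs set-intersection test by an inverted index mapping each value to the set of flattened event indices containing it, so disjointness of a pair becomes a membership test in a per-event conflict set built from that index, with heads precomputed once.
import Mathlib
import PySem

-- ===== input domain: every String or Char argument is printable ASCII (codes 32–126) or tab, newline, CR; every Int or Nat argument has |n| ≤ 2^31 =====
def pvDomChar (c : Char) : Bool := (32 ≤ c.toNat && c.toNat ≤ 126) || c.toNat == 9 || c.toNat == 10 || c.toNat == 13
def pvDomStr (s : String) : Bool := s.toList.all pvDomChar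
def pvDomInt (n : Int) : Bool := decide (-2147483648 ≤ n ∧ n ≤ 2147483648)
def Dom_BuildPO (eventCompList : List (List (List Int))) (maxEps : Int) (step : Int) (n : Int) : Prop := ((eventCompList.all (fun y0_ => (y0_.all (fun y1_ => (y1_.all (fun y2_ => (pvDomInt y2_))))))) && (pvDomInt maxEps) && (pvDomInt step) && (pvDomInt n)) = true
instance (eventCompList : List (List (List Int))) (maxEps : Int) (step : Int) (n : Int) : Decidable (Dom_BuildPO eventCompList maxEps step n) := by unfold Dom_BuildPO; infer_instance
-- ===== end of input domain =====

-- B replaces A's all-pairs set-intersection test by an inverted index (value -> set of event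
-- indices containing it): the disjointness of two events becomes a membership test in a
-- conflict set computed once per fixed event (objective: alternative algorithm/data structure).

-- ===== PORT A =====
-- The pyGetD defaults and the pySetD read-modify-write for Python's 'PO[...].append(...)' are exact
-- under Pre_: there every index taken is in range (outside Pre_ the Python raises IndexError).
def BuildPO (eventCompList : List (List (List Int))) (maxEps : Int) (step : Int) (n : Int) : List (List Int) :=
  (PySem.List.pyRange 0 (eventCompList.length : Int) 1).foldl (fun PO ts =>
    (PySem.List.pyRange 0 (2*n) 1).foldl (fun PO event =>
      let PO := PO ++ [[]]
      (PySem.List.pyRange 0 (eventCompList.length : Int) 1).foldl (fun PO ndx =>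
        (PySem.List.pyRange 0 (2*n) 1).foldl (fun PO ndx1 =>
          let fixed := PySem.List.pyGetD (PySem.List.pyGetD eventCompList ts []) event []
          let checker := PySem.List.pyGetD (PySem.List.pyGetD eventCompList ndx []) ndx1 []
          let intSize := PySem.Set.len (PySem.Set.inter (PySem.Set.ofList fixed) checker)
          if intSize == 0 then
            if PySem.List.pyGetD fixed 0 0 < PySem.List.pyGetD checker 0 0 then
              PySem.List.pySetD PO (2*n*ts + event)
                (PySem.List.pyGetD PO (2*n*ts + event) [] ++ [2*n*ndx + ndx1])
            else PO
          else PO) PO) PO) PO) []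

-- ===== PORT B =====
-- Literal port of Source B; exactness notes (all under Pre_, outside it the Python raises):
--  * 'occ.setdefault(v, set()).add(j)' mutates the set stored at key v in place:
--    exactly PySem.Dict.modify v Set.empty (Set.add · j).
--  * 'heads = [ev[0] for ev in flat]' and 'conflict |= occ[v]': the pyGetD / Dict.getD defaults
--    are never read under Pre_ (every event nonempty, every v ∈ fixed is a key of occ).
def BuildPO_alt (eventCompList : List (List (List Int))) (maxEps : Int) (step : Int) (n : Int) : List (List Int) :=
  let flat := eventCompList.flatMap (fun row =>
    (PySem.List.pyRange 0 (2*n) 1).map (fun e => PySem.List.pyGetD row e []))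
  let m : Int := (flat.length : Int)
  let occ := (PySem.List.enumerate flat 0).foldl (fun occ jev =>
    jev.2.foldl (fun o v =>
      PySem.Dict.modify o v PySem.Set.empty (fun s => PySem.Set.add s jev.1)) occ)
    PySem.Dict.empty
  let heads := flat.map (fun ev => PySem.List.pyGetD ev 0 0)
  (PySem.List.enumerate flat 0).foldl (fun PO ifx =>
    let conflict := ifx.2.foldl (fun c v =>
      PySem.Set.union c (PySem.Dict.getD occ v PySem.Set.empty)) PySem.Set.empty
    PO ++ [(PySem.List.pyRange 0 m 1).filter (fun j =>
      !(PySem.Set.contains conflict j)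
        && decide (PySem.List.pyGetD heads ifx.1 0 < PySem.List.pyGetD heads j 0))]) []

-- ===== PRECONDITION & SPEC =====
-- Pre_ excludes exactly the inputs on which the Python A raises IndexError: with a nonempty list and
-- n >= 1 it indexes every row at positions 0..2n-1 and evaluates ev[0] for every such event, so it
-- raises iff some row is shorter than 2n or some event among the first 2n of a row is empty.
def Pre_BuildPO (eventCompList : List (List (List Int))) (maxEps : Int) (step : Int) (n : Int) : Prop :=
  eventCompList = [] ∨ n ≤ 0 ∨
    (∀ row ∈ eventCompList, 2*n ≤ (row.length : Int) ∧ ∀ ev ∈ row.take (2*n).toNat, ev ≠ [])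
instance (eventCompList : List (List (List Int))) (maxEps : Int) (step : Int) (n : Int) : Decidable (Pre_BuildPO eventCompList maxEps step n) := by unfold Pre_BuildPO; infer_instance

def pvWitness_BuildPO : List (List (List Int)) × Int × Int × Int := ([[[1], [2]]], 0, 0, 1)

def Spec_BuildPO (eventCompList : List (List (List Int))) (maxEps : Int) (step : Int) (n : Int) (out : List (List Int)) : Prop := out = BuildPO_alt eventCompList maxEps step n
instance (eventCompList : List (List (List Int))) (maxEps : Int) (step : Int) (n : Int) (out : List (List Int)) : Decidable (Spec_BuildPO eventCompList maxEps step n out) := by unfold Spec_BuildPO; infer_instance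

-- ===== CLAIM (what is proved, stated in full; the proofs are below) =====
def Claim_equal_BuildPO : Prop := ∀ (eventCompList : List (List (List Int))) (maxEps : Int) (step : Int) (n : Int), Dom_BuildPO eventCompList maxEps step n → Pre_BuildPO eventCompList maxEps step n → Spec_BuildPO eventCompList maxEps step n (BuildPO eventCompList maxEps step n)

-- ===== LEMMAS AND PROOFS =====

-- the canonical flattened grid both sides are reduced to
def pvF (ecl : List (List (List Int))) (k : Nat) : List (List Int) :=
  ecl.flatMap (fun r => (List.range k).map (fun e => r.getD e []))

theorem pv_pyRange_foldl {β : Type} (k : Nat) (g : β → Int → β) (init : β) :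
    (PySem.List.pyRange 0 (k : Int) 1).foldl g init
      = (List.range k).foldl (fun acc (e : Nat) => g acc (e : Int)) init := by
  rw [PySem.List.pyRange_one]
  simp only [sub_zero, Int.toNat_natCast]
  rw [List.foldl_map]
  simp only [zero_add]

theorem pv_enum1 {α β : Type} (d : α) (f : β → Int → α → β) :
    ∀ (xs : List α) (k : Nat), k ≤ xs.length → ∀ (s : Int) (init : β),
      (List.range k).foldl (fun acc (e : Nat) => f acc (s + (e : Int)) (xs.getD e d)) init
        = (PySem.List.enumerate (xs.take k) s).foldl (fun acc q => f acc q.1 q.2) init := by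
  intro xs
  induction xs with
  | nil =>
    intro k hk s init
    have : k = 0 := Nat.le_zero.mp hk
    subst this; simp
  | cons x xs ih =>
    intro k hk s init
    cases k with
    | zero => simp
    | succ k =>
      rw [List.take_succ_cons, PySem.List.enumerate_cons, List.foldl_cons,
          List.range_succ_eq_map, List.foldl_cons, List.foldl_map]
      simp only [Nat.cast_zero, add_zero, List.getD_cons_zero, List.getD_cons_succ]
      rw [← ih k (Nat.succ_le_succ_iff.mp hk) (s + 1) (f init s x)]
      have h : ∀ (e : Nat), s + (((e:Nat)+1 : Nat) : Int) = s + 1 + (e : Int) := by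
        intro e; push_cast; ring
      simp only [Nat.succ_eq_add_one, h]

theorem pv_nest {β : Type} (f : β → Int → List Int → β) (k : Nat) :
    ∀ (rows : List (List (List Int))) (t : Int) (init : β),
      (List.range rows.length).foldl (fun acc (ndx : Nat) =>
          (List.range k).foldl (fun acc (e : Nat) =>
            f acc (t + (k : Int) * (ndx : Int) + (e : Int)) ((rows.getD ndx []).getD e [])) acc) init
        = (PySem.List.enumerate (pvF rows k) t).foldl (fun acc q => f acc q.1 q.2) init := by
  intro rows
  induction rows with
  | nil => intro t init; simp [pvF]
  | cons r rs ih =>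
    intro t init
    rw [List.length_cons, List.range_succ_eq_map, List.foldl_cons, List.foldl_map]
    have hflat : pvF (r :: rs) k
        = (List.range k).map (fun e => r.getD e []) ++ pvF rs k := by
      simp [pvF]
    rw [hflat, PySem.List.enumerate_append, List.foldl_append]
    have hlen : ((List.range k).map (fun e => r.getD e [])).length = k := by simp
    rw [hlen]
    have hfirst :
        (List.range k).foldl (fun acc (e : Nat) =>
            f acc (t + (k : Int) * ((0:Nat) : Int) + (e : Int)) (((r :: rs).getD 0 []).getD e [])) init
          = (PySem.List.enumerate ((List.range k).map (fun e => r.getD e [])) t).foldl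
              (fun acc q => f acc q.1 q.2) init := by
      have h1 := pv_enum1 ([] : List Int) f ((List.range k).map (fun e => r.getD e []))
        k (by simp) t init
      rw [List.take_of_length_le (by simp)] at h1
      rw [← h1]
      apply PySem.List.foldl_congr_mem
      intro acc e he
      have hek : e < k := List.mem_range.mp he
      rw [PySem.List.getD_map_range _ _ _ _ hek]
      simp
    rw [hfirst]
    rw [← ih (t + (k:Int))]
    congr 1
    funext acc j
    have h2 : ∀ (j e : Nat), t + (k : Int) * (((j:Nat)+1 : Nat) : Int) + (e : Int)
        = t + (k:Int) + (k:Int)*(j:Int) + (e : Int) := by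
      intro j e; push_cast; ring
    simp only [Nat.succ_eq_add_one, List.getD_cons_succ, h2]

theorem pvGetD_append {α : Type} (P : List α) (r : α) (Q : List α) (d : α) :
    PySem.List.pyGetD (P ++ r :: Q) (P.length : Int) d = r := by
  simp [PySem.List.pyGetD, PySem.List.pyGet?_append_length]

theorem pvSetD_append {α : Type} (P : List α) (r : α) (Q : List α) (v : α) :
    PySem.List.pySetD (P ++ r :: Q) (P.length : Int) v = P ++ v :: Q := by
  rw [PySem.List.pySetD_natCast]
  rw [List.set_append_right _ _ (Nat.le_refl _)]
  simp

-- A's inner j-loop only appends to the row at index P.length (the last row)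
theorem pv_jloop (l : List (Int × List Int)) (c : List Int → Bool) :
    ∀ (r : List Int) (P : List (List Int)),
      l.foldl (fun PO q =>
          if c q.2 then
            PySem.List.pySetD PO (P.length : Int)
              (PySem.List.pyGetD PO (P.length : Int) [] ++ [q.1])
          else PO) (P ++ [r])
        = P ++ [r ++ (l.filter (fun q => c q.2)).map (·.1)] := by
  induction l with
  | nil => intro r P; simp
  | cons q l ih =>
    intro r P
    rw [List.foldl_cons]
    by_cases h : c q.2
    · rw [if_pos h, pvGetD_append, pvSetD_append, ih (r ++ [q.1]) P]
      simp [h, List.filter_cons]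
    · rw [if_neg h, ih r P]
      simp [h, List.filter_cons]

-- A's outer loop appends one computed row per event (the row index is always the last row)
theorem pv_outerA (lJ : List (Int × List Int)) (cA : List Int → List Int → Bool) :
    ∀ (ys : List (List Int)) (P : List (List Int)),
      (PySem.List.enumerate ys (P.length : Int)).foldl (fun PO p =>
          lJ.foldl (fun PO q =>
            if cA p.2 q.2 then
              PySem.List.pySetD PO p.1 (PySem.List.pyGetD PO p.1 [] ++ [q.1])
            else PO) (PO ++ [[]])) P
        = P ++ ys.map (fun fx => (lJ.filter (fun q => cA fx q.2)).map (·.1)) := by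
  intro ys
  induction ys with
  | nil => intro P; simp
  | cons y ys ih =>
    intro P
    rw [PySem.List.enumerate_cons, List.foldl_cons]
    have hstep : lJ.foldl (fun PO q =>
          if cA y q.2 then
            PySem.List.pySetD PO (P.length : Int) (PySem.List.pyGetD PO (P.length : Int) [] ++ [q.1])
          else PO) (P ++ [[]])
        = P ++ [(lJ.filter (fun q => cA y q.2)).map (·.1)] := by
      rw [pv_jloop lJ (cA y) [] P]; simp
    rw [hstep]
    have hlen : (P.length : Int) + 1 = (((P ++ [(lJ.filter (fun q => cA y q.2)).map (·.1)]).length : Nat) : Int) := by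
      simp
    rw [hlen, ih]
    simp

-- len(set(fixed).intersection(checker)) == 0  is  set(fixed).isdisjoint(checker)
theorem pv_cond (s t : List Int) :
    (PySem.Set.len (PySem.Set.inter s t) == 0) = PySem.Set.isdisjoint s t := by
  induction s with
  | nil => rfl
  | cons a s ih =>
    simp only [PySem.Set.len, PySem.Set.inter, PySem.Set.isdisjoint, PySem.Set.contains] at ih ⊢
    rw [List.filter_cons, List.any_cons]
    cases h : List.contains t a
    · simp only [h, Bool.false_eq_true, if_false, Bool.false_or]
      exact ih
    · simp only [h, Bool.true_or, Bool.not_true, if_pos rfl, List.length_cons]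
      rw [beq_eq_false_iff_ne]
      simp
      omega

theorem pv_if2 {γ : Type} (b : Bool) (p : Prop) [inst : Decidable p] (X Y : γ) :
    (if b then (if p then X else Y) else Y) = if (b && decide p) then X else Y := by
  cases b <;> by_cases h : p <;> simp [h]

theorem pv_nest0 {β : Type} (f : β → Int → List Int → β) (k : Nat)
    (rows : List (List (List Int))) (init : β) :
    (List.range rows.length).foldl (fun acc (ndx : Nat) =>
        (List.range k).foldl (fun acc (e : Nat) =>
          f acc ((k : Int) * (ndx : Int) + (e : Int)) ((rows.getD ndx []).getD e [])) acc) init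
      = (PySem.List.enumerate (pvF rows k) 0).foldl (fun acc q => f acc q.1 q.2) init := by
  have := pv_nest f k rows 0 init
  simpa using this

-- the flat list built by B is pvF
theorem pv_flat_eq (ecl : List (List (List Int))) (k : Nat) :
    ecl.flatMap (fun row =>
        (PySem.List.pyRange 0 (k : Int) 1).map (fun e => PySem.List.pyGetD row e []))
      = pvF ecl k := by
  unfold pvF
  apply List.flatMap_congr
  intro row _
  rw [PySem.List.pyRange_one]
  simp only [sub_zero, Int.toNat_natCast, List.map_map]
  apply List.map_congr_left
  intro e _
  simp [PySem.List.pyGetD_natCast]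

-- map over enumerate reduced to map over the list, given pointwise agreement at (i, xs[i])
theorem pv_map_enum {α β : Type} (xs : List α) (h : Int × α → β) (g : α → β)
    (H : ∀ (i : Nat) (hi : i < xs.length), h ((i : Int), xs[i]) = g xs[i]) :
    (PySem.List.enumerate xs 0).map h = xs.map g := by
  apply List.ext_getElem
  · simp [PySem.List.length_enumerate]
  · intro i h1 h2
    have hi : i < xs.length := by simpa using h2
    have he : i < (PySem.List.enumerate xs 0).length := by
      simpa [PySem.List.length_enumerate] using hi
    simp only [List.getElem_map, PySem.List.getElem_enumerate, zero_add]
    exact H i hi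

-- membership in a fold of unions
theorem pv_mem_foldl_union {β : Type} (g : β → PySem.Set Int) (y : Int) :
    ∀ (l : List β) (s : PySem.Set Int),
      y ∈ l.foldl (fun c v => PySem.Set.union c (g v)) s ↔ y ∈ s ∨ ∃ v ∈ l, y ∈ g v := by
  intro l
  induction l with
  | nil => intro s; simp
  | cons b l ih =>
    intro s
    rw [List.foldl_cons, ih]
    rw [PySem.Set.mem_union]
    constructor
    · rintro ((h | h) | ⟨v, hv, h⟩)
      · exact Or.inl h
      · exact Or.inr ⟨b, by simp, h⟩
      · exact Or.inr ⟨v, by simp [hv], h⟩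
    · rintro (h | ⟨v, hv, h⟩)
      · exact Or.inl (Or.inl h)
      · rcases List.mem_cons.mp hv with rfl | hv
        · exact Or.inl (Or.inr h)
        · exact Or.inr ⟨v, hv, h⟩

-- the inverted index: one event's inner loop
theorem pv_occ_inner (j : Int) :
    ∀ (ev : List Int) (d : PySem.Dict Int (PySem.Set Int)) (v x : Int),
      x ∈ (ev.foldl (fun o w =>
            PySem.Dict.modify o w PySem.Set.empty (fun s => PySem.Set.add s j)) d).getD v PySem.Set.empty
        ↔ x ∈ d.getD v PySem.Set.empty ∨ (v ∈ ev ∧ x = j) := by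
  intro ev
  induction ev with
  | nil => intro d v x; simp
  | cons w ev ih =>
    intro d v x
    rw [List.foldl_cons, ih]
    rw [PySem.Dict.getD_modify]
    by_cases hvw : v = w
    · subst hvw
      rw [if_pos rfl, PySem.Set.mem_add]
      constructor
      · rintro ((h | h) | h)
        · exact Or.inl h
        · exact Or.inr ⟨by simp, h⟩
        · exact Or.inr ⟨by simp, h.2⟩
      · rintro (h | ⟨_, h⟩)
        · exact Or.inl (Or.inl h)
        · exact Or.inl (Or.inr h)
    · rw [if_neg hvw]
      constructor
      · rintro (h | h)
        · exact Or.inl h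
        · exact Or.inr ⟨by simp [h.1], h.2⟩
      · rintro (h | ⟨hv, hx⟩)
        · exact Or.inl h
        · rcases List.mem_cons.mp hv with rfl | hv
          · exact absurd rfl hvw
          · exact Or.inr ⟨hv, hx⟩

-- the inverted index characterised: x ∈ occ[v] iff some listed event contains v at index x
theorem pv_occ :
    ∀ (l : List (Int × List Int)) (d : PySem.Dict Int (PySem.Set Int)) (v x : Int),
      x ∈ (l.foldl (fun o p =>
            p.2.foldl (fun o w =>
              PySem.Dict.modify o w PySem.Set.empty (fun s => PySem.Set.add s p.1)) o) d).getD v PySem.Set.empty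
        ↔ x ∈ d.getD v PySem.Set.empty ∨ ∃ p ∈ l, v ∈ p.2 ∧ x = p.1 := by
  intro l
  induction l with
  | nil => intro d v x; simp
  | cons p l ih =>
    intro d v x
    rw [List.foldl_cons, ih, pv_occ_inner]
    constructor
    · rintro ((h | h) | ⟨q, hq, h⟩)
      · exact Or.inl h
      · exact Or.inr ⟨p, by simp, h⟩
      · exact Or.inr ⟨q, by simp [hq], h⟩
    · rintro (h | ⟨q, hq, h⟩)
      · exact Or.inl (Or.inl h)
      · rcases List.mem_cons.mp hq with rfl | hq
        · exact Or.inl (Or.inr h)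
        · exact Or.inr ⟨q, hq, h⟩

theorem pv_main (ecl : List (List (List Int))) (maxEps step n : Int) (hn : 0 ≤ n) :
    BuildPO ecl maxEps step n = BuildPO_alt ecl maxEps step n := by
  set k : Nat := (2*n).toNat with hkdef
  have hk2 : (2*n : Int) = (k : Int) := by omega
  set F : List (List Int) := pvF ecl k with hF
  set lJ : List (Int × List Int) := PySem.List.enumerate F 0 with hlJ
  set condA : List Int → List Int → Bool := fun fx c =>
    (PySem.Set.len (PySem.Set.inter (PySem.Set.ofList fx) c) == 0)
      && decide (PySem.List.pyGetD fx 0 0 < PySem.List.pyGetD c 0 0) with hcondA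
  -- A side: A equals the per-row gather over the flattened grid
  have hA : BuildPO ecl maxEps step n
      = F.map (fun fx => (lJ.filter (fun q => condA fx q.2)).map (·.1)) := by
    unfold BuildPO
    rw [hk2]
    rw [pv_pyRange_foldl ecl.length _ []]
    simp only [pv_pyRange_foldl, PySem.List.pyGetD_natCast]
    simp only [pv_if2]
    rw [pv_nest0
      (fun PO i fx =>
        (List.range ecl.length).foldl (fun PO e2 =>
          (List.range k).foldl (fun PO e3 =>
            if ((PySem.Set.ofList fx).inter ((ecl.getD e2 []).getD e3 [])).len == 0
                && decide (PySem.List.pyGetD fx 0 0 < PySem.List.pyGetD ((ecl.getD e2 []).getD e3 []) 0 0) then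
              PySem.List.pySetD PO i (PySem.List.pyGetD PO i [] ++ [(k:Int)*(e2:Int)+(e3:Int)])
            else PO) PO) (PO ++ [[]]))
      k ecl []]
    have h2 : ∀ (PO : List (List Int)) (i : Int) (fx : List Int),
        (List.range ecl.length).foldl (fun PO e2 =>
          (List.range k).foldl (fun PO e3 =>
            if ((PySem.Set.ofList fx).inter ((ecl.getD e2 []).getD e3 [])).len == 0
                && decide (PySem.List.pyGetD fx 0 0 < PySem.List.pyGetD ((ecl.getD e2 []).getD e3 []) 0 0) then
              PySem.List.pySetD PO i (PySem.List.pyGetD PO i [] ++ [(k:Int)*(e2:Int)+(e3:Int)])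
            else PO) PO) (PO ++ [[]])
        = lJ.foldl (fun PO q =>
            if condA fx q.2 then
              PySem.List.pySetD PO i (PySem.List.pyGetD PO i [] ++ [q.1])
            else PO) (PO ++ [[]]) := by
      intro PO i fx
      rw [pv_nest0
        (fun PO j c =>
          if condA fx c then
            PySem.List.pySetD PO i (PySem.List.pyGetD PO i [] ++ [j])
          else PO)
        k ecl (PO ++ [[]])]
    have hcongr : (PySem.List.enumerate F 0).foldl
        (fun acc q =>
          (List.range ecl.length).foldl (fun PO e2 =>
            (List.range k).foldl (fun PO e3 =>
              if ((PySem.Set.ofList q.2).inter ((ecl.getD e2 []).getD e3 [])).len == 0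
                  && decide (PySem.List.pyGetD q.2 0 0 < PySem.List.pyGetD ((ecl.getD e2 []).getD e3 []) 0 0) then
                PySem.List.pySetD PO q.1 (PySem.List.pyGetD PO q.1 [] ++ [(k:Int)*(e2:Int)+(e3:Int)])
              else PO) PO) (acc ++ [[]])) []
        = (PySem.List.enumerate F 0).foldl
          (fun PO p =>
            lJ.foldl (fun PO q =>
              if condA p.2 q.2 then
                PySem.List.pySetD PO p.1 (PySem.List.pyGetD PO p.1 [] ++ [q.1])
              else PO) (PO ++ [[]])) [] := by
      congr 1
      funext acc q
      exact h2 acc q.1 q.2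
    rw [hcongr]
    have := pv_outerA lJ condA F []
    simpa using this
  -- B side
  unfold BuildPO_alt
  rw [hk2, pv_flat_eq ecl k, ← hF]
  dsimp only
  rw [PySem.List.foldl_append_singleton_eq_map
    (fun ifx => (PySem.List.pyRange 0 (F.length : Int) 1).filter (fun j =>
      !(PySem.Set.contains (ifx.2.foldl (fun c v =>
          PySem.Set.union c (PySem.Dict.getD
            ((PySem.List.enumerate F 0).foldl (fun occ jev =>
              jev.2.foldl (fun o v =>
                PySem.Dict.modify o v PySem.Set.empty (fun s => PySem.Set.add s jev.1)) occ)
              PySem.Dict.empty) v PySem.Set.empty)) PySem.Set.empty) j)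
        && decide (PySem.List.pyGetD (F.map (fun ev => PySem.List.pyGetD ev 0 0)) ifx.1 0
            < PySem.List.pyGetD (F.map (fun ev => PySem.List.pyGetD ev 0 0)) j 0)))
    (PySem.List.enumerate F 0) []]
  rw [List.nil_append, hA]
  symm
  apply pv_map_enum
  intro i hi
  -- reshape A's row into a filter over pyRange
  have hrowA : (lJ.filter (fun q => condA F[i] q.2)).map (·.1)
      = (PySem.List.pyRange 0 (F.length : Int) 1).filter
          (fun j => condA F[i] (PySem.List.pyGetD F j [])) := by
    rw [hlJ, PySem.List.enumerate_eq_map_pyRange F ([] : List Int)]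
    rw [List.filter_map, List.map_map]
    have : ((fun q : Int × List Int => q.1) ∘
        (fun j => ((j : Int), PySem.List.pyGetD F j []))) = fun j => j := rfl
    rw [this, List.map_id']
    rfl
  rw [hrowA]
  apply List.filter_congr
  intro j hj
  have hjr : 0 ≤ j ∧ j < (F.length : Int) := by
    have := PySem.List.mem_pyRange_one.mp hj
    exact this
  obtain ⟨hj0, hjm⟩ := hjr
  set jn : Nat := j.toNat with hjn
  have hjcast : j = (jn : Int) := by omega
  have hjlt : jn < F.length := by omega
  -- heads values
  have hheads : ∀ (x : Int), 0 ≤ x → x < (F.length : Int) →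
      PySem.List.pyGetD (F.map (fun ev => PySem.List.pyGetD ev 0 0)) x 0
        = PySem.List.pyGetD (PySem.List.pyGetD F x []) 0 0 := by
    intro x _ _
    have h := PySem.List.pyGetD_map (fun ev => PySem.List.pyGetD ev 0 0) F x []
    have h0 : PySem.List.pyGetD ([] : List Int) 0 0 = 0 := rfl
    rw [h0] at h
    exact h
  have hFi : PySem.List.pyGetD F (i : Int) [] = F[i] := by
    rw [PySem.List.pyGetD_natCast, List.getD_eq_getElem F [] hi]
  have hFj : PySem.List.pyGetD F j [] = F[jn] := by
    rw [hjcast, PySem.List.pyGetD_natCast, List.getD_eq_getElem F [] hjlt]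
  -- conflict membership = non-disjointness
  have hconf : (PySem.Set.contains ((F[i]'hi).foldl (fun c v =>
        PySem.Set.union c (PySem.Dict.getD
          ((PySem.List.enumerate F 0).foldl (fun occ jev =>
            jev.2.foldl (fun o v =>
              PySem.Dict.modify o v PySem.Set.empty (fun s => PySem.Set.add s jev.1)) occ)
            PySem.Dict.empty) v PySem.Set.empty)) PySem.Set.empty) j) = true
      ↔ ∃ v ∈ F[i]'hi, v ∈ F[jn]'hjlt := by
    rw [PySem.Set.contains_iff, pv_mem_foldl_union]
    constructor
    · rintro (h | ⟨v, hv, h⟩)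
      · simp at h
      · rw [pv_occ] at h
        rcases h with h | ⟨p, hp, hvp, hxp⟩
        · simp at h
        · obtain ⟨kk, hkk, rfl⟩ := PySem.List.mem_enumerate_iff F 0 p |>.mp hp
          refine ⟨v, hv, ?_⟩
          simp only [zero_add] at hxp
          have : jn = kk := by omega
          subst this
          exact hvp
    · rintro ⟨v, hv, h⟩
      refine Or.inr ⟨v, hv, ?_⟩
      rw [pv_occ]
      refine Or.inr ⟨((jn : Int), F[jn]'hjlt), ?_, h, hjcast⟩
      rw [PySem.List.mem_enumerate_iff]
      exact ⟨jn, hjlt, by simp⟩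
  -- assemble the boolean equality
  rw [hcondA]
  simp only [hFj]
  rw [pv_cond]
  rw [hheads (i : Int) (by positivity) (by exact_mod_cast hi), hheads j hj0 hjm]
  rw [hFi, hFj]
  congr 1
  rw [Bool.eq_iff_iff, Bool.not_eq_true', Bool.eq_false_iff, ne_eq, hconf,
      PySem.Set.isdisjoint_iff]
  constructor
  · intro h v hv hvj
    exact h ⟨v, (PySem.Set.mem_ofList _ _).mp hv, hvj⟩
  · rintro h ⟨v, hv, hvj⟩
    exact h v ((PySem.Set.mem_ofList _ _).mpr hv) hvj

theorem pv_trivial_n (ecl : List (List (List Int))) (maxEps step n : Int) (hn : n < 0) :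
    BuildPO ecl maxEps step n = BuildPO_alt ecl maxEps step n := by
  have hr : PySem.List.pyRange 0 (2*n) 1 = [] := PySem.List.pyRange_one_eq_nil (by omega)
  unfold BuildPO BuildPO_alt
  rw [hr]
  have h0 : List.flatMap (fun (row : List (List Int)) => ([] : List (List Int))) ecl = [] :=
    List.flatMap_eq_nil_iff.mpr (by simp)
  simp [h0]

theorem pv_equal (ecl : List (List (List Int))) (maxEps step n : Int) :
    BuildPO ecl maxEps step n = BuildPO_alt ecl maxEps step n := by
  by_cases hn : 0 ≤ n
  · exact pv_main ecl maxEps step n hn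
  · exact pv_trivial_n ecl maxEps step n (by omega)

-- ===== VERDICT (by name: the statement is the Claim_ definition above) =====
theorem BuildPO_spec : Claim_equal_BuildPO := by
  intro ecl maxEps step n _ _
  unfold Spec_BuildPO
  exact pv_equal ecl maxEps step n
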